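-- pv_equiv track=rewrite | github.com/leonkalema/monitorsbom | github_advisory_scanner.py | _detect_ecosystem
-- ===== SOURCE A (Python) =====
-- from typing import Dict, List, Optional, Tuple
--
-- def _detect_ecosystem(component: Dict) -> List[str]:
--     """Detect GitHub ecosystem from component information"""
--     name = component.get('name', '').lower()
--     purl = component.get('purl', '').lower()
--
--     ecosystems = []
--
--     # Map based on package URL or name patterns
--     if 'npm:' in purl or any(x in name for x in ['node_modules', '@']):
--         ecosystems.append('NPM')
--     elif 'pypi:' in purl or 'python' in purl:
--         ecosystems.append('PIP')
--     elif 'maven:' in purl or 'java' in purl: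
--         ecosystems.append('MAVEN')
--     elif 'nuget:' in purl or '.net' in purl:
--         ecosystems.append('NUGET')
--     elif 'gem:' in purl or 'ruby' in purl:
--         ecosystems.append('RUBYGEMS')
--     elif 'go:' in purl or 'golang' in purl:
--         ecosystems.append('GO')
--     elif 'cargo:' in purl or 'rust' in purl:
--         ecosystems.append('RUST')
--     elif 'composer:' in purl or 'php' in purl:
--         ecosystems.append('COMPOSER')
--
--     # If no specific ecosystem detected, try common ones
--     if not ecosystems:
--         ecosystems = ['NPM', 'PIP', 'MAVEN']
--
--     return ecosystems
-- ===== SOURCE B (Python) =====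
-- _KEYWORDS = [
--     ('npm:', 'NPM'), ('pypi:', 'PIP'), ('python', 'PIP'),
--     ('maven:', 'MAVEN'), ('java', 'MAVEN'),
--     ('nuget:', 'NUGET'), ('.net', 'NUGET'),
--     ('gem:', 'RUBYGEMS'), ('ruby', 'RUBYGEMS'),
--     ('go:', 'GO'), ('golang', 'GO'),
--     ('cargo:', 'RUST'), ('rust', 'RUST'),
--     ('composer:', 'COMPOSER'), ('php', 'COMPOSER'),
-- ]
-- _PRIORITY = ['NPM', 'PIP', 'MAVEN', 'NUGET', 'RUBYGEMS', 'GO', 'RUST', 'COMPOSER']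
--
-- def _detect_ecosystem(component):
--     name = component.get('name', '').lower()
--     purl = component.get('purl', '').lower()
--     # stage 1: collect ALL matching ecosystems
--     matched = {label for kw, label in _KEYWORDS if kw in purl}
--     if 'node_modules' in name or '@' in name:
--         matched.add('NPM')
--     # stage 2: pick the highest-priority match, or the common defaults
--     hits = [label for label in _PRIORITY if label in matched]
--     return [hits[0]] if hits else ['NPM', 'PIP', 'MAVEN']
-- ===== Notes on version B (the rewrite author's own statement) =====
-- stated objective: simpler
-- what changed: Instead of A's first-match if/elif cascade, B runs two staged passes: it first collects the set of ALL ecosystems whose keyword occurs (from a keyword->label table), then selects the highest-priority member of that set, falling back to the common defaults when the set is empty.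
import Mathlib
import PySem

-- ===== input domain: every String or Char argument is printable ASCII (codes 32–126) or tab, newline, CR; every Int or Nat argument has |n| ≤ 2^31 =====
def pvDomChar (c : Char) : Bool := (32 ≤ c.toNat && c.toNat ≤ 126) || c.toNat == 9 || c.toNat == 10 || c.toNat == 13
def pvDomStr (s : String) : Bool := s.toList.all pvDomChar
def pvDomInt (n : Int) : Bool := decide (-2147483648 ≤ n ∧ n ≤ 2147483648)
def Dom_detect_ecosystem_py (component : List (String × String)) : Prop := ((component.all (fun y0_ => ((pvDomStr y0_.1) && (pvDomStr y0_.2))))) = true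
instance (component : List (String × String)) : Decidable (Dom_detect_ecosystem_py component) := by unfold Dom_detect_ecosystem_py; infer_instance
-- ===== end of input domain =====

-- B replaces A's first-match if/elif cascade by two staged passes: collect the set of ALL
-- matching ecosystems from a keyword table, then select the highest-priority match (objective: simpler).

-- ===== PORT A =====
-- the if/elif chain, after name/purl are extracted
def pvChainA (name purl : String) : List String :=
  let ecosystems : List String := []
  let ecosystems :=
    if PySem.Str.isIn "npm:" purl || (["node_modules", "@"].any (fun x => PySem.Str.isIn x name)) then
      ecosystems ++ ["NPM"]
    else if PySem.Str.isIn "pypi:" purl || PySem.Str.isIn "python" purl then ecosystems ++ ["PIP"]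
    else if PySem.Str.isIn "maven:" purl || PySem.Str.isIn "java" purl then ecosystems ++ ["MAVEN"]
    else if PySem.Str.isIn "nuget:" purl || PySem.Str.isIn ".net" purl then ecosystems ++ ["NUGET"]
    else if PySem.Str.isIn "gem:" purl || PySem.Str.isIn "ruby" purl then ecosystems ++ ["RUBYGEMS"]
    else if PySem.Str.isIn "go:" purl || PySem.Str.isIn "golang" purl then ecosystems ++ ["GO"]
    else if PySem.Str.isIn "cargo:" purl || PySem.Str.isIn "rust" purl then ecosystems ++ ["RUST"]
    else if PySem.Str.isIn "composer:" purl || PySem.Str.isIn "php" purl then ecosystems ++ ["COMPOSER"]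
    else ecosystems
  if ecosystems = [] then ["NPM", "PIP", "MAVEN"] else ecosystems

def detect_ecosystem_py (component : List (String × String)) : List String :=
  let name := PySem.Str.lower (PySem.Dict.getD (PySem.Dict.mk component) "name" "")
  let purl := PySem.Str.lower (PySem.Dict.getD (PySem.Dict.mk component) "purl" "")
  pvChainA name purl

-- ===== PORT B =====
def pvKeywords : List (String × String) :=
  [("npm:", "NPM"), ("pypi:", "PIP"), ("python", "PIP"),
   ("maven:", "MAVEN"), ("java", "MAVEN"),
   ("nuget:", "NUGET"), (".net", "NUGET"),
   ("gem:", "RUBYGEMS"), ("ruby", "RUBYGEMS"),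
   ("go:", "GO"), ("golang", "GO"),
   ("cargo:", "RUST"), ("rust", "RUST"),
   ("composer:", "COMPOSER"), ("php", "COMPOSER")]

def pvPriority : List String :=
  ["NPM", "PIP", "MAVEN", "NUGET", "RUBYGEMS", "GO", "RUST", "COMPOSER"]

-- stage 1 of Source B: the set of ALL matching ecosystems ({label for kw, label in _KEYWORDS if kw in purl},
-- then the conditional matched.add('NPM'))
def pvMatched (name purl : String) : PySem.Set String :=
  let matched : PySem.Set String :=
    PySem.Set.ofList ((pvKeywords.filter (fun kv => PySem.Str.isIn kv.1 purl)).map Prod.snd)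
  if PySem.Str.isIn "node_modules" name || PySem.Str.isIn "@" name then
    PySem.Set.add matched "NPM"
  else matched

-- stage 2 of Source B: the highest-priority hit, or the common defaults
def pvStagesB (name purl : String) : List String :=
  let hits := pvPriority.filter (fun label => PySem.Set.contains (pvMatched name purl) label)
  match hits with
  | [] => ["NPM", "PIP", "MAVEN"]
  | h :: _ => [h]

def detect_ecosystem_py_alt (component : List (String × String)) : List String :=
  let name := PySem.Str.lower (PySem.Dict.getD (PySem.Dict.mk component) "name" "")
  let purl := PySem.Str.lower (PySem.Dict.getD (PySem.Dict.mk component) "purl" "")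
  pvStagesB name purl

-- ===== PRECONDITION & SPEC =====
def Spec_detect_ecosystem_py (component : List (String × String)) (out : List String) : Prop := out = detect_ecosystem_py_alt component
instance (component : List (String × String)) (out : List String) : Decidable (Spec_detect_ecosystem_py component out) := by unfold Spec_detect_ecosystem_py; infer_instance

-- ===== CLAIM (what is proved, stated in full; the proofs are below) =====
def Claim_equal_detect_ecosystem_py : Prop := ∀ (component : List (String × String)), Dom_detect_ecosystem_py component → Spec_detect_ecosystem_py component (detect_ecosystem_py component)

-- ===== LEMMAS AND PROOFS =====
-- membership of each label in B's matched set equals the corresponding condition of A's chain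
theorem contains_NPM (name purl : String) :
    PySem.Set.contains (pvMatched name purl) "NPM"
      = (PySem.Str.isIn "npm:" purl || (PySem.Str.isIn "node_modules" name || PySem.Str.isIn "@" name)) := by
  simp only [pvMatched, pvKeywords, PySem.Set.contains_eq_listContains, List.contains_eq_mem]
  split_ifs with h <;>
    simp_all [PySem.Set.add, PySem.Set.mem_ofList, List.mem_filter, List.mem_map, List.mem_cons]
  · split_ifs <;> simp_all [List.mem_filter]

theorem contains_PIP (name purl : String) :
    PySem.Set.contains (pvMatched name purl) "PIP"
      = (PySem.Str.isIn "pypi:" purl || PySem.Str.isIn "python" purl) := by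
  simp only [pvMatched, pvKeywords, PySem.Set.contains_eq_listContains, List.contains_eq_mem]
  split_ifs with h <;>
    simp_all [PySem.Set.add, PySem.Set.mem_ofList, List.mem_filter, List.mem_map, List.mem_cons]
  · split_ifs <;> simp_all [List.mem_filter]

theorem contains_MAVEN (name purl : String) :
    PySem.Set.contains (pvMatched name purl) "MAVEN"
      = (PySem.Str.isIn "maven:" purl || PySem.Str.isIn "java" purl) := by
  simp only [pvMatched, pvKeywords, PySem.Set.contains_eq_listContains, List.contains_eq_mem]
  split_ifs with h <;>
    simp_all [PySem.Set.add, PySem.Set.mem_ofList, List.mem_filter, List.mem_map, List.mem_cons]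
  · split_ifs <;> simp_all [List.mem_filter]

theorem contains_NUGET (name purl : String) :
    PySem.Set.contains (pvMatched name purl) "NUGET"
      = (PySem.Str.isIn "nuget:" purl || PySem.Str.isIn ".net" purl) := by
  simp only [pvMatched, pvKeywords, PySem.Set.contains_eq_listContains, List.contains_eq_mem]
  split_ifs with h <;>
    simp_all [PySem.Set.add, PySem.Set.mem_ofList, List.mem_filter, List.mem_map, List.mem_cons]
  · split_ifs <;> simp_all [List.mem_filter]

theorem contains_RUBYGEMS (name purl : String) :
    PySem.Set.contains (pvMatched name purl) "RUBYGEMS"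
      = (PySem.Str.isIn "gem:" purl || PySem.Str.isIn "ruby" purl) := by
  simp only [pvMatched, pvKeywords, PySem.Set.contains_eq_listContains, List.contains_eq_mem]
  split_ifs with h <;>
    simp_all [PySem.Set.add, PySem.Set.mem_ofList, List.mem_filter, List.mem_map, List.mem_cons]
  · split_ifs <;> simp_all [List.mem_filter]

theorem contains_GO (name purl : String) :
    PySem.Set.contains (pvMatched name purl) "GO"
      = (PySem.Str.isIn "go:" purl || PySem.Str.isIn "golang" purl) := by
  simp only [pvMatched, pvKeywords, PySem.Set.contains_eq_listContains, List.contains_eq_mem]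
  split_ifs with h <;>
    simp_all [PySem.Set.add, PySem.Set.mem_ofList, List.mem_filter, List.mem_map, List.mem_cons]
  · split_ifs <;> simp_all [List.mem_filter]

theorem contains_RUST (name purl : String) :
    PySem.Set.contains (pvMatched name purl) "RUST"
      = (PySem.Str.isIn "cargo:" purl || PySem.Str.isIn "rust" purl) := by
  simp only [pvMatched, pvKeywords, PySem.Set.contains_eq_listContains, List.contains_eq_mem]
  split_ifs with h <;>
    simp_all [PySem.Set.add, PySem.Set.mem_ofList, List.mem_filter, List.mem_map, List.mem_cons]
  · split_ifs <;> simp_all [List.mem_filter]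

theorem contains_COMPOSER (name purl : String) :
    PySem.Set.contains (pvMatched name purl) "COMPOSER"
      = (PySem.Str.isIn "composer:" purl || PySem.Str.isIn "php" purl) := by
  simp only [pvMatched, pvKeywords, PySem.Set.contains_eq_listContains, List.contains_eq_mem]
  split_ifs with h <;>
    simp_all [PySem.Set.add, PySem.Set.mem_ofList, List.mem_filter, List.mem_map, List.mem_cons]
  · split_ifs <;> simp_all [List.mem_filter]

-- the cascade and the two-stage selection agree: rewrite B's per-label membership tests into
-- A's chain conditions, then check all valuations of the 8 conditions exhaustively
set_option maxHeartbeats 1000000 in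
theorem pvChainA_eq_pvStagesB (name purl : String) : pvChainA name purl = pvStagesB name purl := by
  unfold pvChainA pvStagesB pvPriority
  simp only [List.any_cons, List.any_nil, Bool.or_false]
  simp only [List.filter_cons, List.filter_nil]
  simp only [contains_NPM, contains_PIP, contains_MAVEN, contains_NUGET, contains_RUBYGEMS,
    contains_GO, contains_RUST, contains_COMPOSER, List.nil_append]
  generalize (PySem.Str.isIn "npm:" purl || (PySem.Str.isIn "node_modules" name || PySem.Str.isIn "@" name)) = c1
  generalize (PySem.Str.isIn "pypi:" purl || PySem.Str.isIn "python" purl) = c2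
  generalize (PySem.Str.isIn "maven:" purl || PySem.Str.isIn "java" purl) = c3
  generalize (PySem.Str.isIn "nuget:" purl || PySem.Str.isIn ".net" purl) = c4
  generalize (PySem.Str.isIn "gem:" purl || PySem.Str.isIn "ruby" purl) = c5
  generalize (PySem.Str.isIn "go:" purl || PySem.Str.isIn "golang" purl) = c6
  generalize (PySem.Str.isIn "cargo:" purl || PySem.Str.isIn "rust" purl) = c7
  generalize (PySem.Str.isIn "composer:" purl || PySem.Str.isIn "php" purl) = c8
  revert c1 c2 c3 c4 c5 c6 c7 c8
  decide

-- ===== VERDICT (by name: the statement is the Claim_ definition above) =====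
theorem detect_ecosystem_py_spec : Claim_equal_detect_ecosystem_py := by
  intro component _
  unfold Spec_detect_ecosystem_py detect_ecosystem_py detect_ecosystem_py_alt
  exact pvChainA_eq_pvStagesB _ _
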